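-- pv_equiv track=rewrite | github.com/allanVvz/CSI-Can_Signal_Identifier | math_engine.py | count_peaks_and_troughs
-- ===== SOURCE A (Python) =====
-- def count_peaks_and_troughs(data):
--     peaks = []
--     troughs = []
--     for i in range(1, len(data) - 1):
--         if data[i] > data[i - 1] and data[i] > data[i + 1]:
--             peaks.append(data[i])
--         elif data[i] < data[i - 1] and data[i] < data[i + 1]:
--             troughs.append(data[i])
--     return peaks, troughs
-- ===== SOURCE B (Python) =====
-- def count_peaks_and_troughs(data):
--     # Stage 1: derived slope-sign array for each adjacent pair (comparison-based sign).
--     def sign(a, b):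
--         return (b > a) - (b < a)
--     slopes = list(map(sign, data, data[1:]))
--     # Stage 2: classify each interior element by its surrounding slope transition.
--     peaks, troughs = [], []
--     for x, s0, s1 in zip(data[1:], slopes, slopes[1:]):
--         if (s0, s1) == (1, -1):
--             peaks.append(x)
--         elif (s0, s1) == (-1, 1):
--             troughs.append(x)
--     return peaks, troughs
-- ===== Notes on version B (the rewrite author's own statement) =====
-- stated objective: alternative
-- what changed: Two-stage slope-sign approach: first computes a derived array of comparison-based slope signs for adjacent pairs, then classifies peaks/troughs by rise-fall / fall-rise sign transitions instead of comparing each element to both neighbours.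
import Mathlib
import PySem

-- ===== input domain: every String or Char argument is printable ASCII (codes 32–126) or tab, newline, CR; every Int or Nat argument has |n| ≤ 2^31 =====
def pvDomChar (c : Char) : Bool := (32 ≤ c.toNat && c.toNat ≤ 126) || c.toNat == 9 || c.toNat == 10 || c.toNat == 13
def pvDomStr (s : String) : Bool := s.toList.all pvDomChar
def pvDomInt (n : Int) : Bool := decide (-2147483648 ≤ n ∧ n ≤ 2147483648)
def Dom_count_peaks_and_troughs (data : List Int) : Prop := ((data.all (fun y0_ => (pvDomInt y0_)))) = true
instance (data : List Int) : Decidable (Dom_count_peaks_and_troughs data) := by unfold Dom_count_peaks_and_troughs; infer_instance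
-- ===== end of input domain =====

-- B recomputes the answer via a derived slope-sign array and sign-transition classification; proved equal to A on all inputs.


-- ===== PORT A =====
-- for i in range(1, len(data)-1): if data[i] > data[i-1] and data[i] > data[i+1] … ; indices always in range, so pyGetD is exact
def count_peaks_and_troughs (data : List Int) : List Int × List Int :=
  (PySem.List.pyRange 1 ((data.length : Int) - 1) 1).foldl
    (fun (pt : List Int × List Int) i =>
      if PySem.List.pyGetD data i 0 > PySem.List.pyGetD data (i - 1) 0 ∧
         PySem.List.pyGetD data i 0 > PySem.List.pyGetD data (i + 1) 0 then
        (pt.1 ++ [PySem.List.pyGetD data i 0], pt.2)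
      else if PySem.List.pyGetD data i 0 < PySem.List.pyGetD data (i - 1) 0 ∧
              PySem.List.pyGetD data i 0 < PySem.List.pyGetD data (i + 1) 0 then
        (pt.1, pt.2 ++ [PySem.List.pyGetD data i 0])
      else pt)
    ([], [])

-- ===== PORT B =====
-- sign(a, b) = (b > a) - (b < a)
def pvSign (a b : Int) : Int := (if a < b then 1 else 0) - (if b < a then 1 else 0)

-- slopes = list(map(sign, data, data[1:])); then classify data[1:] by the pair of surrounding slopes
def count_peaks_and_troughs_alt (data : List Int) : List Int × List Int :=
  let slopes := List.zipWith pvSign data (data.drop 1)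
  ((data.drop 1).zip (slopes.zip (slopes.drop 1))).foldl
    (fun (pt : List Int × List Int) w =>
      if w.2.1 = 1 ∧ w.2.2 = -1 then (pt.1 ++ [w.1], pt.2)
      else if w.2.1 = -1 ∧ w.2.2 = 1 then (pt.1, pt.2 ++ [w.1])
      else pt)
    ([], [])

-- ===== PRECONDITION & SPEC =====
def Spec_count_peaks_and_troughs (data : List Int) (out : List Int × List Int) : Prop := out = count_peaks_and_troughs_alt data
instance (data : List Int) (out : List Int × List Int) : Decidable (Spec_count_peaks_and_troughs data out) := by unfold Spec_count_peaks_and_troughs; infer_instance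

-- ===== CLAIM (what is proved, stated in full; the proofs are below) =====
def Claim_equal_count_peaks_and_troughs : Prop := ∀ (data : List Int), Dom_count_peaks_and_troughs data → Spec_count_peaks_and_troughs data (count_peaks_and_troughs data)

-- ===== LEMMAS AND PROOFS =====

lemma pvSign_eq_one (a b : Int) : pvSign a b = 1 ↔ a < b := by
  unfold pvSign; split_ifs <;> omega

lemma pvSign_eq_neg_one (a b : Int) : pvSign a b = -1 ↔ b < a := by
  unfold pvSign; split_ifs <;> omega

-- the value/slope triple A's loop body reads at index i, as an element of B's zipped list
def pvElemAt (data : List Int) (i : Int) : Int × (Int × Int) :=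
  (PySem.List.pyGetD data i 0,
   (pvSign (PySem.List.pyGetD data (i - 1) 0) (PySem.List.pyGetD data i 0),
    pvSign (PySem.List.pyGetD data i 0) (PySem.List.pyGetD data (i + 1) 0)))

lemma pvMapElems (data : List Int) :
    (PySem.List.pyRange 1 ((data.length : Int) - 1) 1).map (pvElemAt data)
      = (data.drop 1).zip ((List.zipWith pvSign data (data.drop 1)).zip
          ((List.zipWith pvSign data (data.drop 1)).drop 1)) := by
  apply List.ext_getElem
  · simp [PySem.List.length_pyRange_one]
  · intro k h1 h2
    have hk : k + 2 < data.length := by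
      simp at h2; omega
    simp only [List.getElem_map, PySem.List.getElem_pyRange_one, pvElemAt, List.getElem_zip,
               List.getElem_zipWith, List.getElem_drop]
    have h0 : (1 : Int) + (k : Int) - 1 = ((k : Nat) : Int) := by push_cast; ring
    have h1' : (1 : Int) + (k : Int) = (((k + 1 : Nat)) : Int) := by push_cast; ring
    have h2' : (1 : Int) + (k : Int) + 1 = (((k + 2 : Nat)) : Int) := by omega
    rw [h0, h2', h1']
    rw [PySem.List.pyGetD_natCast, PySem.List.pyGetD_natCast, PySem.List.pyGetD_natCast]
    simp [List.getD_eq_getElem?_getD,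
          List.getElem?_eq_getElem (by omega : k < data.length),
          List.getElem?_eq_getElem (by omega : k + 1 < data.length),
          List.getElem?_eq_getElem (by omega : k + 2 < data.length)]
    have e1 : 1 + k = k + 1 := by omega
    have e2 : 1 + (k + 1) = k + 2 := by omega
    simp only [e1, e2]
    exact ⟨trivial, trivial, trivial⟩

-- ===== VERDICT (by name: the statement is the Claim_ definition above) =====
theorem count_peaks_and_troughs_spec : Claim_equal_count_peaks_and_troughs := by
  intro data _
  unfold Spec_count_peaks_and_troughs count_peaks_and_troughs count_peaks_and_troughs_alt
  show _ = ((data.drop 1).zip ((List.zipWith pvSign data (data.drop 1)).zip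
        ((List.zipWith pvSign data (data.drop 1)).drop 1))).foldl
    (fun (pt : List Int × List Int) w =>
      if w.2.1 = 1 ∧ w.2.2 = -1 then (pt.1 ++ [w.1], pt.2)
      else if w.2.1 = -1 ∧ w.2.2 = 1 then (pt.1, pt.2 ++ [w.1])
      else pt)
    ([], [])
  rw [show ((data.drop 1).zip ((List.zipWith pvSign data (data.drop 1)).zip
        ((List.zipWith pvSign data (data.drop 1)).drop 1)))
      = (PySem.List.pyRange 1 ((data.length : Int) - 1) 1).map (pvElemAt data) from (pvMapElems data).symm,
     List.foldl_map]
  have hstep : (fun (pt : List Int × List Int) i =>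
      if (pvElemAt data i).2.1 = 1 ∧ (pvElemAt data i).2.2 = -1 then (pt.1 ++ [(pvElemAt data i).1], pt.2)
      else if (pvElemAt data i).2.1 = -1 ∧ (pvElemAt data i).2.2 = 1 then (pt.1, pt.2 ++ [(pvElemAt data i).1])
      else pt)
    = (fun (pt : List Int × List Int) i =>
      if PySem.List.pyGetD data i 0 > PySem.List.pyGetD data (i - 1) 0 ∧
         PySem.List.pyGetD data i 0 > PySem.List.pyGetD data (i + 1) 0 then
        (pt.1 ++ [PySem.List.pyGetD data i 0], pt.2)
      else if PySem.List.pyGetD data i 0 < PySem.List.pyGetD data (i - 1) 0 ∧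
              PySem.List.pyGetD data i 0 < PySem.List.pyGetD data (i + 1) 0 then
        (pt.1, pt.2 ++ [PySem.List.pyGetD data i 0])
      else pt) := by
    funext pt i
    unfold pvElemAt
    simp only [pvSign_eq_one, pvSign_eq_neg_one, gt_iff_lt]
  rw [hstep]
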